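-- pv_equiv track=rewrite | github.com/IndianDrake123/NYUcoursework | Intro to Problem Solving/HW/#9/hw9_q1.py | group_students
-- ===== SOURCE A (Python) =====
-- def group_students(clubs, students):
--     final_assignment = []
--
--     for club in clubs:
--         members = []
--         for student in students:
--             if student[1] == club[0] and len(members) < club[1]:
--                 members.append(student[0])
--         final_assignment.append(members)
--
--     return final_assignment
-- ===== SOURCE B (Python) =====
-- def group_students(clubs, students):
--     buckets = {}
--     for name, club in students:
--         buckets.setdefault(club, []).append(name)
--     return [buckets.get(name, [])[:max(cap, 0)] for name, cap in clubs]
-- ===== Notes on version B (the rewrite author's own statement) =====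
-- stated objective: alternative
-- what changed: B buckets students by club in one dict-building pass over the student list and answers each club by slicing a capacity-length prefix of its bucket, instead of A's full rescan of all students for every club.
import Mathlib
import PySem

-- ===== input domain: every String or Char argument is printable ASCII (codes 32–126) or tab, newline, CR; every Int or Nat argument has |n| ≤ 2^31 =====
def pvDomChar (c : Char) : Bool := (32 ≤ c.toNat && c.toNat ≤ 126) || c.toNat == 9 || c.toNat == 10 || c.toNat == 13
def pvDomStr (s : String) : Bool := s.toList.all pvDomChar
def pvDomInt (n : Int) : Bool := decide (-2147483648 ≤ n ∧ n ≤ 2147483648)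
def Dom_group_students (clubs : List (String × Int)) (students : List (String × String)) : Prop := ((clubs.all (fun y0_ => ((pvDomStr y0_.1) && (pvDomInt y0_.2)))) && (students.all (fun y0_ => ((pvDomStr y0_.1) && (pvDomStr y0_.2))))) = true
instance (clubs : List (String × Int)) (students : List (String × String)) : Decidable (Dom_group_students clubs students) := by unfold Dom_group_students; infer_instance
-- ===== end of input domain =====

-- B replaces A's per-club rescan of all students by one bucketing pass over the students
-- plus a capacity-length prefix per club (a different algorithm; same measured cost here).


-- ===== PORT A =====
def group_students (clubs : List (String × Int)) (students : List (String × String)) : List (List String) :=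
  clubs.foldl (fun final_assignment club =>
    final_assignment ++
      [students.foldl (fun members student =>
        if student.2 == club.1 && (members.length : Int) < club.2
        then members ++ [student.1] else members) []]) []

-- ===== PORT B =====
def group_students_alt (clubs : List (String × Int)) (students : List (String × String)) : List (List String) :=
  let buckets := students.foldl (fun d s => d.modify s.2 [] (· ++ [s.1])) PySem.Dict.empty
  clubs.map (fun club => (buckets.getD club.1 []).take (max club.2 0).toNat)

-- ===== PRECONDITION & SPEC =====
def Spec_group_students (clubs : List (String × Int)) (students : List (String × String)) (out : List (List String)) : Prop := out = group_students_alt clubs students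
instance (clubs : List (String × Int)) (students : List (String × String)) (out : List (List String)) : Decidable (Spec_group_students clubs students out) := by unfold Spec_group_students; infer_instance

-- ===== CLAIM (what is proved, stated in full; the proofs are below) =====
def Claim_equal_group_students : Prop := ∀ (clubs : List (String × Int)) (students : List (String × String)), Dom_group_students clubs students → Spec_group_students clubs students (group_students clubs students)

-- ===== LEMMAS AND PROOFS =====

-- A's inner loop: starting from `mem`, it appends the names of students in club `c`
-- until the list reaches length `cap`.
theorem innerA_eq (l : List (String × String)) (c : String) (cap : Int) :
    ∀ mem : List String,
      l.foldl (fun members student =>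
        if student.2 == c && (members.length : Int) < cap
        then members ++ [student.1] else members) mem
      = mem ++ (((l.filter (fun s => s.2 == c)).map Prod.fst).take (cap - mem.length).toNat) := by
  induction l with
  | nil => intro mem; simp
  | cons s l ih =>
    intro mem
    simp only [List.foldl_cons, List.filter_cons]
    by_cases hc : s.2 == c
    · simp only [hc]
      by_cases hlen : (mem.length : Int) < cap
      · simp only [hlen, decide_true, Bool.and_self, if_true, ih, List.map_cons]
        have h1 : (cap - mem.length).toNat = ((cap - (mem ++ [s.1]).length).toNat) + 1 := by
          simp only [List.length_append, List.length_cons, List.length_nil]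
          omega
        rw [h1, List.take_succ_cons]
        simp
      · rw [if_neg (by simp [hlen]), ih]
        have h0 : (cap - mem.length).toNat = 0 := by omega
        simp [h0]
    · have hc' : (s.2 == c) = false := by simpa using hc
      rw [if_neg (by simp [hc']), ih, hc']
      simp

-- B's bucket for club `c` holds exactly the names of the students of club `c`, in order.
theorem bucket_eq (l : List (String × String)) (c : String) :
    (l.foldl (fun d s => d.modify s.2 [] (· ++ [s.1])) PySem.Dict.empty).getD c []
      = (l.filter (fun s => s.2 == c)).map Prod.fst := by
  have h := PySem.Dict.getD_foldl_modify_append (l := l.map Prod.swap)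
    (d := (PySem.Dict.empty : PySem.Dict String (List String))) (c := c)
  rw [List.foldl_map] at h
  simp only [Prod.swap] at h
  rw [h]
  simp [List.filter_map, Function.comp_def, List.map_map]

-- ===== VERDICT (by name: the statement is the Claim_ definition above) =====
theorem group_students_spec : Claim_equal_group_students := by
  intro clubs students _
  unfold Spec_group_students group_students group_students_alt
  rw [PySem.List.foldl_append_singleton_eq_map]
  apply List.map_congr_left
  intro club _
  rw [innerA_eq, bucket_eq]
  simp only [List.length_nil, Int.natCast_zero, Int.sub_zero, List.nil_append]
  congr 1
  omega
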